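-- pv_equiv track=rewrite | github.com/Byeong-soo/Algorithm | test/K/third.py | solution
-- ===== SOURCE A (Python) =====
-- def solution(A):
--     number_set = set(A)
--     number_dic = dict.fromkeys(number_set, 0)
--     sum_value = 0
--     for i in range(len(A)):
--         if number_dic[A[i]] < 2:
--             number_dic[A[i]] += 1
--     l = sorted(number_dic.items(), reverse=True)
--
--     for i in range(1, len(l)):
--         sum_value += l[i][1]
--     return sum_value+1
-- ===== SOURCE B (Python) =====
-- def solution(A):
--     s = sorted(A)
--     total = 0
--     run = 1
--     for prev, x in zip(s, s[1:]):
--         if x != prev: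
--             total += min(run, 2)
--             run = 1
--         else:
--             run += 1
--     return 1 + total
-- ===== Notes on version B (the rewrite author's own statement) =====
-- stated objective: faster
-- what changed: Instead of counting occurrences capped at 2 in a dict, sorting the (key,count) items in reverse and summing all but the first by index, B sorts A once and makes one run-length pass over adjacent pairs, adding min(run,2) for every finished run so the final (maximum) run is never added.
import Mathlib
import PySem

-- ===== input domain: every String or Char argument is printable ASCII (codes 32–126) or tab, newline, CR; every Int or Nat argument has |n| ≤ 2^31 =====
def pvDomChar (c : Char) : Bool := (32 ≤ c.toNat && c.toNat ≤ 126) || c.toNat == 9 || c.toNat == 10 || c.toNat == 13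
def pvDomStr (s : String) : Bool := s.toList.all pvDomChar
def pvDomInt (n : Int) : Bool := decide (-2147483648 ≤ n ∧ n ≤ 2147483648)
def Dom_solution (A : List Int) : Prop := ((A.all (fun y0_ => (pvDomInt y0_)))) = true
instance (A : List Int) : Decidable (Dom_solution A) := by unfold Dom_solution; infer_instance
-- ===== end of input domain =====

-- B replaces A's capped-count dict, descending item sort and index-loop sum by a single
-- run-length scan over sorted(A): add min(run, 2) per finished run (the last run, the maximum, is never added), +1.


-- ===== PORT A =====
def solution (A : List Int) : Int :=
  let numberSet : PySem.Set Int := PySem.Set.ofList A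
  let numberDic : PySem.Dict Int Int :=
    numberSet.foldl (fun d k => d.insert k 0) PySem.Dict.empty
  let numberDic2 : PySem.Dict Int Int :=
    (PySem.List.pyRange 0 (PySem.List.len A)).foldl
      (fun d i =>
        if d.getD (PySem.List.pyGetD A i 0) 0 < 2 then
          d.insert (PySem.List.pyGetD A i 0) (d.getD (PySem.List.pyGetD A i 0) 0 + 1)
        else d) numberDic
  let l := PySem.List.sorted2 numberDic2.items (fun p => p.1) (fun p => p.2) true
  let sumValue :=
    (PySem.List.pyRange 1 (PySem.List.len l)).foldl
      (fun acc i => acc + (PySem.List.pyGetD l i (0, 0)).2) 0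
  sumValue + 1

-- ===== PORT B =====
def solution_alt (A : List Int) : Int :=
  let s := PySem.List.sorted A (fun x => x) false
  let res := (s.zip (PySem.List.slice s (some 1) none)).foldl
      (fun (st : Int × Int) (pr : Int × Int) =>
        if pr.2 ≠ pr.1 then (st.1 + min st.2 2, 1) else (st.1, st.2 + 1)) ((0 : Int), (1 : Int))
  1 + res.1

-- ===== PRECONDITION & SPEC =====
def Spec_solution (A : List Int) (out : Int) : Prop := out = solution_alt A
instance (A : List Int) (out : Int) : Decidable (Spec_solution A out) := by unfold Spec_solution; infer_instance

-- ===== CLAIM (what is proved, stated in full; the proofs are below) =====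
def Claim_equal_solution : Prop := ∀ (A : List Int), Dom_solution A → Spec_solution A (solution A)

-- ===== LEMMAS AND PROOFS =====
-- capIter v n: n applications of "if v < 2 then v + 1 else v" (the capped increment of A's loop)
def capIter (v : Int) : Nat → Int
  | 0 => v
  | n + 1 => capIter (if v < 2 then v + 1 else v) n

theorem capIter_eq_min (n : Nat) : ∀ (v : Int), 0 ≤ v → v ≤ 2 → capIter v n = min 2 (v + n) := by
  induction n with
  | zero => intro v h0 h2; simp [capIter]; omega
  | succ n ih =>
    intro v h0 h2
    by_cases h : v < 2
    · simp only [capIter, if_pos h]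
      rw [ih (v + 1) (by omega) (by omega)]
      push_cast; omega
    · simp only [capIter, if_neg h]
      rw [ih v h0 h2]
      push_cast; omega

theorem contains_mapkeys (ks : List Int) (v : Int → Int) (x : Int) :
    (PySem.Dict.mk (ks.map (fun k => (k, v k)))).contains x = true ↔ x ∈ ks := by
  simp [PySem.Dict.contains, List.any_map, List.any_eq_true]

theorem getD_mapkeys (ks : List Int) (v : Int → Int) (x : Int) (hx : x ∈ ks) :
    (PySem.Dict.mk (ks.map (fun k => (k, v k)))).getD x 0 = v x := by
  induction ks with
  | nil => cases hx
  | cons k t ih =>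
    by_cases h : k = x
    · subst h; simp [PySem.Dict.getD, PySem.Dict.get?]
    · have hx' : x ∈ t := by cases hx with
        | head => exact absurd rfl h
        | tail _ h' => exact h'
      have := ih hx'
      simp only [PySem.Dict.getD, PySem.Dict.get?] at this ⊢
      have hne : (k == x) = false := by simp [h]
      simp only [List.map_cons, List.find?_cons, hne]
      exact this

theorem insert_mapkeys (ks : List Int) (v : Int → Int) (x : Int) (w : Int) (hx : x ∈ ks) :
    (PySem.Dict.mk (ks.map (fun k => (k, v k)))).insert x w
      = PySem.Dict.mk (ks.map (fun k => (k, if k = x then w else v k))) := by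
  have hc : (PySem.Dict.mk (ks.map (fun k => (k, v k)))).contains x = true :=
    (contains_mapkeys ks v x).mpr hx
  simp only [PySem.Dict.insert, hc, if_pos]
  congr 1
  rw [List.map_map]
  apply List.map_congr_left
  intro k _
  by_cases h : k = x
  · subst h; simp
  · simp [h]

theorem capIter_of_ge_two (n : Nat) (v : Int) (h : 2 ≤ v) : capIter v n = v := by
  induction n with
  | zero => rfl
  | succ n ih => simp only [capIter, if_neg (by omega : ¬ v < 2)]; exact ih

theorem loop_items (ks : List Int) :
    ∀ (l : List Int) (v : Int → Int), (∀ x ∈ l, x ∈ ks) →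
    (l.foldl (fun d x => if d.getD x 0 < 2 then d.insert x (d.getD x 0 + 1) else d)
        (PySem.Dict.mk (ks.map (fun k => (k, v k))))).items
      = ks.map (fun k => (k, capIter (v k) (l.count k))) := by
  intro l
  induction l with
  | nil => intro v _; simp [capIter]
  | cons x t ih =>
    intro v hmem
    have hx : x ∈ ks := hmem x (List.mem_cons_self)
    have hg := getD_mapkeys ks v x hx
    simp only [List.foldl_cons, hg]
    by_cases h : v x < 2
    · rw [if_pos h, insert_mapkeys ks v x (v x + 1) hx,
        ih (fun k => if k = x then v x + 1 else v k) (fun y hy => hmem y (List.mem_cons_of_mem _ hy))]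
      apply List.map_congr_left
      intro k _
      by_cases hk : k = x
      · subst hk
        simp [List.count_cons_self, capIter, h]
      · have hxk : (x == k) = false := by simp; exact fun e => hk e.symm
        have hcnt : List.count k (x :: t) = List.count k t := by
          rw [List.count_cons, hxk]; simp
        rw [if_neg hk, hcnt]
    · rw [if_neg h]
      rw [ih v (fun y hy => hmem y (List.mem_cons_of_mem _ hy))]
      apply List.map_congr_left
      intro k _
      by_cases hk : k = x
      · subst hk
        rw [List.count_cons_self, capIter_of_ge_two _ _ (by omega), capIter_of_ge_two _ _ (by omega)]
      · have hxk : (x == k) = false := by simp; exact fun e => hk e.symm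
        rw [List.count_cons, hxk]; simp

theorem insertBy_congr {α : Type} (b1 b2 : α → α → Bool) (x : α) :
    ∀ (ys : List α), (∀ y ∈ ys, b1 x y = b2 x y) →
    PySem.List.insertBy b1 x ys = PySem.List.insertBy b2 x ys := by
  intro ys
  induction ys with
  | nil => intro _; rfl
  | cons y t ih =>
    intro h
    simp only [PySem.List.insertBy]
    rw [h y (List.mem_cons_self)]
    by_cases hb : b2 x y = true
    · simp [hb]
    · simp only [Bool.not_eq_true] at hb
      simp [hb, ih (fun z hz => h z (List.mem_cons_of_mem _ hz))]

-- the "before" predicates of sorted2 (lex, reverse) and sorted-by-fst (reverse) agree on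
-- pairs with distinct first components
theorem before_eq_of_ne (x y : Int × Int) (h : x.1 ≠ y.1) :
    (decide (y.1 < x.1) || (!decide (x.1 < y.1) && decide (y.2 < x.2))) = decide (y.1 < x.1) := by
  by_cases h1 : y.1 < x.1
  · simp [h1]
  · have h2 : x.1 < y.1 := by omega
    simp [h2]

theorem fold_insertBy_congr :
    ∀ (l acc : List (Int × Int)), ((l ++ acc).map Prod.fst).Nodup →
    l.foldl (fun acc x => PySem.List.insertBy
        (fun a b => decide (b.1 < a.1) || (!decide (a.1 < b.1) && decide (b.2 < a.2))) x acc) acc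
      = l.foldl (fun acc x => PySem.List.insertBy (fun a b => decide (b.1 < a.1)) x acc) acc := by
  intro l
  induction l with
  | nil => intro acc _; rfl
  | cons x t ih =>
    intro acc hnd
    have hx : x.1 ∉ ((t ++ acc).map Prod.fst) := by
      simp only [List.cons_append, List.map_cons, List.nodup_cons] at hnd
      exact hnd.1
    have hstep : PySem.List.insertBy
        (fun a b => decide (b.1 < a.1) || (!decide (a.1 < b.1) && decide (b.2 < a.2))) x acc
        = PySem.List.insertBy (fun a b => decide (b.1 < a.1)) x acc := by
      apply insertBy_congr
      intro y hy
      apply before_eq_of_ne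
      intro he
      exact hx (by rw [he]; exact List.mem_map_of_mem (List.mem_append_right t hy))
    simp only [List.foldl_cons, hstep]
    apply ih
    have hperm : (t ++ PySem.List.insertBy (fun a b => decide (b.1 < a.1)) x acc).Perm
        ((x :: t) ++ acc) := by
      have h1 : (t ++ PySem.List.insertBy (fun a b => decide (b.1 < a.1)) x acc).Perm
          (t ++ x :: acc) := List.Perm.append_left t (PySem.List.insertBy_perm _ x acc)
      exact h1.trans (List.perm_middle.trans (by simp))
    exact ((hperm.map Prod.fst).nodup_iff).mpr hnd

theorem sorted2_eq_sorted_fst (ps : List (Int × Int)) (hnd : (ps.map Prod.fst).Nodup) :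
    PySem.List.sorted2 ps (fun p => p.1) (fun p => p.2) true
      = PySem.List.sorted ps (fun p => p.1) true := by
  rw [PySem.List.sorted_rev_eq_foldl_insertBy]
  show ps.foldl (fun acc x => PySem.List.insertBy
      (fun a b => decide (b.1 < a.1) || (!decide (a.1 < b.1) && decide (b.2 < a.2))) x acc) []
    = _
  exact fold_insertBy_congr ps [] (by simpa using hnd)

theorem contains_empty (k : Int) : (PySem.Dict.empty : PySem.Dict Int Int).contains k = false := by
  rfl

theorem fromkeys_items :
    ∀ (l : List Int) (d : PySem.Dict Int Int),
    (∀ k ∈ l, d.contains k = false) → l.Nodup →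
    (l.foldl (fun d k => d.insert k 0) d).items = d.items ++ l.map (fun k => (k, (0:Int))) := by
  intro l
  induction l with
  | nil => intro d _ _; simp
  | cons k t ih =>
    intro d hfresh hnd
    have hk : d.contains k = false := hfresh k (List.mem_cons_self)
    have hins : d.insert k 0 = PySem.Dict.mk (d.items ++ [(k, (0:Int))]) := by
      simp [PySem.Dict.insert, hk]
    simp only [List.foldl_cons, hins]
    rw [ih (PySem.Dict.mk (d.items ++ [(k, (0:Int))]))]
    · simp
    · intro k' hk'
      have h1 : d.contains k' = false := hfresh k' (List.mem_cons_of_mem _ hk')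
      have h2 : k ≠ k' := by
        intro he; subst he; exact (List.nodup_cons.mp hnd).1 hk'
      simp only [PySem.Dict.contains, List.any_append] at h1 ⊢
      simp [h1, h2]
    · exact (List.nodup_cons.mp hnd).2


-- adjacent pairs of a run followed by a nonempty rest
theorem zipAdj_rep_append (k y : Int) (ys : List Int) :
    ∀ (m : Nat),
    ((List.replicate (m+1) k ++ y :: ys).zip ((List.replicate (m+1) k ++ y :: ys).drop 1))
      = List.replicate m (k, k) ++ (k, y) :: ((y :: ys).zip ys) := by
  intro m
  induction m with
  | zero => simp [List.zip]
  | succ m ih =>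
    rw [List.replicate_succ]
    simp only [List.cons_append, List.drop_succ_cons]
    rw [show ((List.replicate (m+1) k ++ y :: ys).drop 0) = List.replicate (m+1) k ++ y :: ys from rfl]
    rw [show List.replicate (m+1) k ++ y :: ys = k :: (List.replicate m k ++ y :: ys) from by
      rw [List.replicate_succ]; rfl]
    rw [List.zip_cons_cons]
    rw [show k :: (List.replicate m k ++ y :: ys) = List.replicate (m+1) k ++ y :: ys from by
      rw [List.replicate_succ]; rfl]
    have := ih
    rw [show (List.replicate (m+1) k ++ y :: ys).drop 1 = List.replicate m k ++ y :: ys from by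
      rw [List.replicate_succ]; rfl] at this
    rw [this, List.replicate_succ]
    rfl

-- adjacent pairs of a bare run
theorem zipAdj_rep (k : Int) : ∀ (m : Nat),
    ((List.replicate (m+1) k).zip ((List.replicate (m+1) k).drop 1))
      = List.replicate m (k, k) := by
  intro m
  induction m with
  | zero => simp
  | succ m ih =>
    rw [List.replicate_succ]
    simp only [List.drop_succ_cons]
    rw [show (List.replicate (m+1) k).drop 0 = List.replicate (m+1) k from rfl]
    rw [show (List.replicate (m+1) k) = k :: List.replicate m k from List.replicate_succ ..]
    rw [List.zip_cons_cons]
    rw [show k :: List.replicate m k = List.replicate (m+1) k from (List.replicate_succ ..).symm]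
    have := ih
    rw [show (List.replicate (m+1) k).drop 1 = List.replicate m k from by
      rw [List.replicate_succ]; rfl] at this
    rw [this, List.replicate_succ]

-- equal adjacent pairs only grow the run counter
theorem fold_eq_pairs (k : Int) : ∀ (m : Nat) (acc r : Int),
    List.foldl (fun (st : Int × Int) (pr : Int × Int) =>
        if pr.2 ≠ pr.1 then (st.1 + min st.2 2, 1) else (st.1, st.2 + 1))
      (acc, r) (List.replicate m (k, k)) = (acc, r + m) := by
  intro m
  induction m with
  | zero => intro acc r; simp
  | succ m ih =>
    intro acc r
    rw [List.replicate_succ, List.foldl_cons]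
    simp only [ne_eq, not_true_eq_false, if_false]
    rw [ih]
    congr 1
    push_cast
    ring

-- the run-length scan over a block decomposition
theorem zipfold (c : Int → Nat) :
    ∀ (ks : List Int) (k : Int) (m : Nat) (acc r : Int),
    List.IsChain (· ≠ ·) (k :: ks) → (∀ x ∈ ks, 1 ≤ c x) →
    (((List.replicate (m+1) k ++ ks.flatMap (fun x => List.replicate (c x) x)).zip
        ((List.replicate (m+1) k ++ ks.flatMap (fun x => List.replicate (c x) x)).drop 1)).foldl
      (fun (st : Int × Int) (pr : Int × Int) =>
        if pr.2 ≠ pr.1 then (st.1 + min st.2 2, 1) else (st.1, st.2 + 1)) (acc, r)).1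
      = acc + (if ks.isEmpty then 0
          else min (r + m) 2 + ((ks.dropLast).map (fun x => min ((c x : Int)) 2)).sum) := by
  intro ks
  induction ks with
  | nil =>
    intro k m acc r _ _
    simp only [List.flatMap_nil, List.append_nil, List.isEmpty_nil, if_pos]
    rw [zipAdj_rep, fold_eq_pairs]
    simp
  | cons x t ih =>
    intro k m acc r hch hpos
    have hcx : 1 ≤ c x := hpos x List.mem_cons_self
    obtain ⟨n, hn⟩ : ∃ n, c x = n + 1 := ⟨c x - 1, by omega⟩
    have hkx : k ≠ x := (List.isChain_cons_cons.mp hch).1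
    have hrw : (x :: t).flatMap (fun x => List.replicate (c x) x)
        = x :: (List.replicate n x ++ t.flatMap (fun x => List.replicate (c x) x)) := by
      rw [List.flatMap_cons, hn, List.replicate_succ]; rfl
    rw [hrw, zipAdj_rep_append, List.foldl_append, fold_eq_pairs, List.foldl_cons]
    rw [if_pos (by simpa using Ne.symm hkx)]
    have hs' : x :: (List.replicate n x ++ t.flatMap (fun x => List.replicate (c x) x))
        = List.replicate (n+1) x ++ t.flatMap (fun x => List.replicate (c x) x) := by
      rw [List.replicate_succ]; rfl
    have hdrop : (List.replicate (n+1) x ++ t.flatMap (fun x => List.replicate (c x) x)).drop 1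
        = List.replicate n x ++ t.flatMap (fun x => List.replicate (c x) x) := by
      rw [List.replicate_succ]; rfl
    have hzip : ((x :: (List.replicate n x ++ t.flatMap (fun x => List.replicate (c x) x))).zip
        (List.replicate n x ++ t.flatMap (fun x => List.replicate (c x) x)))
        = ((List.replicate (n+1) x ++ t.flatMap (fun x => List.replicate (c x) x)).zip
          ((List.replicate (n+1) x ++ t.flatMap (fun x => List.replicate (c x) x)).drop 1)) := by
      rw [hdrop, hs']
    rw [hzip]
    rw [ih x n (acc + min (r + ↑m) 2) 1 (List.isChain_cons_cons.mp hch).2 (fun y hy => hpos y (List.mem_cons_of_mem _ hy))]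
    cases t with
    | nil =>
      simp
    | cons w t' =>
      simp only [List.isEmpty_cons, List.dropLast_cons₂, List.map_cons, List.sum_cons]
      rw [hn]
      push_cast
      ring

theorem count_flatMap_rep (c : Int → Nat) (v : Int) :
    ∀ (ks : List Int), ks.Nodup →
    List.count v (ks.flatMap (fun x => List.replicate (c x) x)) = if v ∈ ks then c v else 0 := by
  intro ks
  induction ks with
  | nil => intro _; simp
  | cons k t ih =>
    intro hnd
    rw [List.flatMap_cons, List.count_append, List.count_replicate,
      ih (List.nodup_cons.mp hnd).2]
    by_cases hv : v = k
    · subst hv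
      have : v ∉ t := (List.nodup_cons.mp hnd).1
      simp [this]
    · have hkv : ¬ (k = v) := fun h => hv h.symm
      simp only [List.mem_cons]
      rw [if_neg (by simp only [beq_iff_eq]; omega)]
      by_cases hvt : v ∈ t
      · simp [hvt, hv]
      · simp [hvt, hv]

theorem pairwise_le_flatMap_rep (c : Int → Nat) :
    ∀ (ks : List Int), ks.Pairwise (· < ·) →
    (ks.flatMap (fun x => List.replicate (c x) x)).Pairwise (· ≤ ·) := by
  intro ks
  induction ks with
  | nil => intro _; simp
  | cons k t ih =>
    intro hp
    rw [List.flatMap_cons, List.pairwise_append]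
    refine ⟨List.pairwise_replicate.mpr (by simp), ih (List.pairwise_cons.mp hp).2, ?_⟩
    intro a ha b hb
    rw [List.eq_of_mem_replicate ha]
    obtain ⟨x, hx, hbx⟩ := List.mem_flatMap.mp hb
    rw [List.eq_of_mem_replicate hbx]
    exact le_of_lt ((List.pairwise_cons.mp hp).1 x hx)

theorem sortedA_eq_flatMap (A : List Int) :
    PySem.List.sorted A (fun x => x) false
      = (PySem.List.sorted (PySem.Set.ofList A) (fun x => x) false).flatMap
          (fun x => List.replicate (List.count x A) x) := by
  have hknd : (PySem.Set.ofList A).Nodup := PySem.Set.nodup_ofList A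
  have hund : (PySem.List.sorted (PySem.Set.ofList A) (fun x => x) false).Nodup :=
    (PySem.List.sorted_perm _ _ _).nodup_iff.mpr hknd
  apply PySem.List.sorted_id_eq_of_perm_of_pairwise
  · rw [List.perm_iff_count]
    intro v
    rw [count_flatMap_rep _ v _ hund]
    by_cases hv : v ∈ A
    · rw [if_pos (by rw [PySem.List.mem_sorted, PySem.Set.mem_ofList]; exact hv)]
    · rw [if_neg (by rw [PySem.List.mem_sorted, PySem.Set.mem_ofList]; exact hv),
        List.count_eq_zero.mpr hv]
  · exact pairwise_le_flatMap_rep _ _ (PySem.List.sorted_ofList_pairwise_lt A)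

-- ===== VERDICT (by name: the statement is the Claim_ definition above) =====
theorem solution_spec : Claim_equal_solution := by
  intro A _
  unfold Spec_solution solution solution_alt
  simp only []
  by_cases hA : A = []
  · subst hA; rfl
  -- name the key objects
  have hknd : (PySem.Set.ofList A).Nodup := PySem.Set.nodup_ofList A
  -- step 1: dict.fromkeys over the distinct values
  have h1 : (PySem.Set.ofList A).foldl (fun d k => d.insert k 0) PySem.Dict.empty
      = PySem.Dict.mk ((PySem.Set.ofList A).map (fun k => (k, (0:Int)))) := by
    have h := fromkeys_items (PySem.Set.ofList A) PySem.Dict.empty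
      (fun k _ => contains_empty k) hknd
    exact congrArg PySem.Dict.mk h
  rw [h1]
  rw [PySem.List.foldl_pyRange_pyGetD A 0
      (fun d x => if PySem.Dict.getD d x 0 < 2 then PySem.Dict.insert d x (PySem.Dict.getD d x 0 + 1) else d)
      (PySem.Dict.mk ((PySem.Set.ofList A).map (fun k => (k, (0:Int))))) (a := 0) (le_refl 0)]
  simp only [Int.toNat_zero, List.drop_zero]
  have h2 : (A.foldl (fun d x => if d.getD x 0 < 2 then d.insert x (d.getD x 0 + 1) else d)
      (PySem.Dict.mk ((PySem.Set.ofList A).map (fun k => (k, (0:Int)))))).items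
      = (PySem.Set.ofList A).map (fun k => (k, capIter 0 (List.count k A))) :=
    loop_items (PySem.Set.ofList A) A (fun _ => 0)
      (fun x hx => (PySem.Set.mem_ofList A x).mpr hx)
  rw [h2]
  have hnd2 : ((((PySem.Set.ofList A)).map (fun k => (k, capIter 0 (List.count k A)))).map
      Prod.fst).Nodup := by
    simp [List.map_map, Function.comp_def]
  rw [sorted2_eq_sorted_fst _ hnd2]
  have h5 : PySem.List.sorted ((PySem.Set.ofList A).map (fun k => (k, capIter 0 (List.count k A))))
        (fun p => p.1) true
      = ((PySem.List.sorted (PySem.Set.ofList A) (fun x => x) false).reverse).map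
          (fun k => (k, capIter 0 (List.count k A))) := by
    apply PySem.List.sorted_rev_eq_of_perm_of_pairwise_gt
    · exact List.Perm.map _ ((List.reverse_perm _).trans (PySem.List.sorted_perm _ _ _))
    · rw [List.pairwise_map, List.pairwise_reverse]
      simpa using PySem.List.sorted_ofList_pairwise_lt A
  rw [h5]
  rw [PySem.List.foldl_pyRange_pyGetD
      (((PySem.List.sorted (PySem.Set.ofList A) (fun x => x) false).reverse).map
        (fun k => (k, capIter 0 (List.count k A))))
      ((0:Int), (0:Int)) (fun acc p => acc + p.2) 0 (a := 1) (by norm_num)]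
  rw [PySem.List.foldl_add _ (fun p => (p : Int × Int).2) 0]
  have hone : (Int.toNat 1) = 1 := rfl
  rw [hone, List.drop_one, List.map_reverse, List.tail_reverse, List.map_reverse,
      List.sum_reverse, ← List.map_dropLast, List.map_map]
  have hpt : ∀ k : Int, ((fun p => (p : Int × Int).2) ∘ (fun k => (k, capIter 0 (List.count k A)))) k
      = min ((List.count k A : Int)) 2 := by
    intro k
    simp only [Function.comp_apply]
    rw [capIter_eq_min _ 0 (le_refl 0) (by norm_num)]
    omega
  rw [List.map_congr_left (fun k _ => hpt k)]
  -- B side: the sorted list is the concatenation of its runs of equal values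
  rw [PySem.List.slice_from_one, ← List.drop_one, sortedA_eq_flatMap A]
  have hmem_up : ∀ x, x ∈ (PySem.List.sorted (PySem.Set.ofList A) (fun x => x) false) ↔ x ∈ A := by
    intro x; rw [PySem.List.mem_sorted, PySem.Set.mem_ofList]
  obtain ⟨a, A', hA'⟩ : ∃ a A', A = a :: A' := by
    cases A with
    | nil => exact absurd rfl hA
    | cons a A' => exact ⟨a, A', rfl⟩
  obtain ⟨u, us, hup⟩ : ∃ u us,
      PySem.List.sorted (PySem.Set.ofList A) (fun x => x) false = u :: us := by
    cases hcase : PySem.List.sorted (PySem.Set.ofList A) (fun x => x) false with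
    | nil =>
      have hmm := (hmem_up a).mpr (by rw [hA']; exact List.mem_cons_self)
      rw [hcase] at hmm
      cases hmm
    | cons u us => exact ⟨u, us, rfl⟩
  have hchain : List.IsChain (· ≠ ·) (u :: us) := by
    have hp := PySem.List.sorted_ofList_pairwise_lt A
    rw [hup] at hp
    exact (hp.imp (fun h => ne_of_lt h)).isChain
  have hposc : ∀ x ∈ us, 1 ≤ List.count x A := by
    intro x hx
    have hxa : x ∈ A := (hmem_up x).mp (by rw [hup]; exact List.mem_cons_of_mem _ hx)
    have := List.count_pos_iff.mpr hxa
    omega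
  have hu_mem : u ∈ A := (hmem_up u).mp (by rw [hup]; exact List.mem_cons_self)
  obtain ⟨m, hm⟩ : ∃ m, List.count u A = m + 1 :=
    ⟨List.count u A - 1, by have := List.count_pos_iff.mpr hu_mem; omega⟩
  rw [hup, List.flatMap_cons, hm]
  rw [show (fun x => List.replicate (List.count x A) x) = fun x => List.replicate ((fun x => List.count x A) x) x from rfl]
  rw [zipfold (fun x => List.count x A) us u m 0 1 hchain hposc]
  cases us with
  | nil => simp
  | cons w us' =>
    simp only [List.isEmpty_cons, List.dropLast_cons₂, List.map_cons, List.sum_cons]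
    rw [if_neg (by simp)]
    rw [hm]
    push_cast
    ring
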